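-- pv_equiv track=rewrite | github.com/e555321e/Clade | backend/app/services/species/speciation.py | _next_lineage_code
-- ===== SOURCE A (Python) =====
-- def _next_lineage_code(parent_code: str, existing_codes: set[str]) -> str:
--     """生成单个子代编码（保留用于向后兼容）"""
--     base = f"{parent_code}a"
--     idx = 1
--     new_code = f"{base}{idx}"
--     while new_code in existing_codes:
--         idx += 1
--         new_code = f"{base}{idx}"
--     return new_code
-- ===== SOURCE B (Python) =====
-- def _next_lineage_code(parent_code: str, existing_codes: set[str]) -> str:
--     """Bounded-candidate marking: by pigeonhole the answer's index is at most
--     len(existing_codes)+1, so build an index of the candidate suffixes "1".."m",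
--     mark in ONE pass over existing_codes which candidates occur, then take the
--     first unmarked index from the mark table (no membership probing of the set)."""
--     base = f"{parent_code}a"
--     m = len(existing_codes) + 1
--     pos = {str(k): k for k in range(1, m + 1)}
--     present = [False] * (m + 1)
--     for code in existing_codes:
--         if code.startswith(base):
--             k = pos.get(code[len(base):])
--             if k is not None:
--                 present[k] = True
--     k = 1
--     while present[k]:
--         k += 1
--     return f"{base}{k}"
-- ===== Notes on version B (the rewrite author's own statement) =====
-- stated objective: alternative
-- what changed: A probes the code set with candidate strings one by one until a miss; B never tests membership in the set: it builds an index of the m=len+1 candidate suffixes (enough by pigeonhole), marks in a single pass over existing_codes which candidates occur in a boolean table, and then scans the table for the first unmarked index.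
import Mathlib
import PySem

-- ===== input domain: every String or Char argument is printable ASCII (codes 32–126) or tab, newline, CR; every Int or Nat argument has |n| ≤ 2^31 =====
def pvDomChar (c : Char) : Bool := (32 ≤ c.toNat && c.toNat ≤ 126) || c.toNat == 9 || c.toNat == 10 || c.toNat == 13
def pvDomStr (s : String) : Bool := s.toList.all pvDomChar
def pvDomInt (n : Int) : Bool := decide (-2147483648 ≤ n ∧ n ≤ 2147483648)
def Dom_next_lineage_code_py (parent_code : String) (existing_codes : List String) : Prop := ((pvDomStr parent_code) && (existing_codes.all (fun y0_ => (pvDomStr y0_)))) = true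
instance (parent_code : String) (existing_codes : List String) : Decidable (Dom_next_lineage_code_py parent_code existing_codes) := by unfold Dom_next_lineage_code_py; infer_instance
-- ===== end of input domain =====

-- B replaces A's incremental probe-the-set loop by bounded-candidate marking: an index of the
-- candidate suffixes "1".."m" (m = len+1, enough by pigeonhole), one marking pass over the
-- codes, then a scan of the mark table — no membership test against the code set (alternative).

-- ===== PORT A =====
-- A's while loop; fuel existing_codes.length + 1 provably reaches the first free code
-- (the probe strings are pairwise distinct), so the fuel-exhausted fallback is never taken.
def nlcALoop (codes : List String) (base : String) : Nat → Int → String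
  | 0, idx => base ++ PySem.Int.toStr idx
  | fuel + 1, idx =>
    let new_code := base ++ PySem.Int.toStr idx
    if new_code ∈ codes then nlcALoop codes base fuel (idx + 1) else new_code

def next_lineage_code_py (parent_code : String) (existing_codes : List String) : String :=
  let base := parent_code ++ "a"
  nlcALoop existing_codes base (existing_codes.length + 1) 1

-- ===== PORT B =====
-- pos = {str(k): k for k in range(1, m + 1)}
def nlcIndex (m : Int) : PySem.Dict String Int :=
  (PySem.List.pyRange 1 (m + 1)).foldl (fun d k => d.insert (PySem.Int.toStr k) k) PySem.Dict.empty

-- the marking pass: for code in existing_codes: if startswith, k = pos.get(suffix), mark k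
def nlcMark (base : String) (pos : PySem.Dict String Int) (codes : List String)
    (present : List Bool) : List Bool :=
  codes.foldl (fun p code =>
    if PySem.Str.startswith code base then
      match pos.get? (PySem.Str.slice code (some (PySem.Str.len base)) none) with
      | some k => p.set k.toNat true   -- k is a dict value, 1 ≤ k ≤ m < p.length: Python's present[k] = True
      | none => p
    else p) present

-- while present[k]: k += 1  — the probed index provably stays in range, so the getD
-- default is never consulted; fuel len + 1 provably suffices
def nlcScan (present : List Bool) : Nat → Int → Int
  | 0, k => k
  | fuel + 1, k =>
    if (PySem.List.pyGet? present k).getD false then nlcScan present fuel (k + 1) else k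

def next_lineage_code_py_alt (parent_code : String) (existing_codes : List String) : String :=
  let base := parent_code ++ "a"
  let m : Int := (existing_codes.length : Int) + 1
  let pos := nlcIndex m
  let present := nlcMark base pos existing_codes (PySem.List.pyRepeat [false] (m + 1))
  base ++ PySem.Int.toStr (nlcScan present (existing_codes.length + 1) 1)

-- ===== PRECONDITION & SPEC =====
def Spec_next_lineage_code_py (parent_code : String) (existing_codes : List String) (out : String) : Prop := out = next_lineage_code_py_alt parent_code existing_codes
instance (parent_code : String) (existing_codes : List String) (out : String) : Decidable (Spec_next_lineage_code_py parent_code existing_codes out) := by unfold Spec_next_lineage_code_py; infer_instance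

-- ===== CLAIM (what is proved, stated in full; the proofs are below) =====
def Claim_equal_next_lineage_code_py : Prop := ∀ (parent_code : String) (existing_codes : List String), Dom_next_lineage_code_py parent_code existing_codes → Spec_next_lineage_code_py parent_code existing_codes (next_lineage_code_py parent_code existing_codes)

-- ===== LEMMAS AND PROOFS =====

-- reading the mark table, as the scan does
def nlcGet (p : List Bool) (i : Int) : Bool := (PySem.List.pyGet? p i).getD false

-- the decimal-digit fold: evaluates str(n) back to n, giving injectivity of str on 0 ≤ n
def nlcStep (a : Nat) (c : Char) : Nat := 10 * a + (c.toNat - 48)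

lemma nlc_digitChar_toNat (k : Nat) (hk : k < 10) : (Nat.digitChar k).toNat = k + 48 := by
  interval_cases k <;> rfl

lemma nlc_step_digitChar (a k : Nat) (hk : k < 10) :
    nlcStep a (Nat.digitChar k) = 10 * a + k := by
  unfold nlcStep
  rw [nlc_digitChar_toNat k hk]
  omega

lemma nlc_core_fold : ∀ (f n : Nat) (ds : List Char), n < f →
    List.foldl nlcStep 0 (Nat.toDigitsCore 10 f n ds) = List.foldl nlcStep n ds := by
  intro f
  induction f with
  | zero => omega
  | succ f ih =>
    intro n ds h
    rw [Nat.toDigitsCore]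
    by_cases h10 : n / 10 = 0
    · simp only [h10, if_pos, List.foldl]
      rw [nlc_step_digitChar 0 (n % 10) (by omega)]
      have : n % 10 = n := by omega
      simp [this]
    · simp only [h10, if_false]
      rw [ih (n / 10) _ (by omega)]
      simp only [List.foldl]
      rw [nlc_step_digitChar (n / 10) (n % 10) (by omega)]
      congr 1
      omega

lemma nlc_fold_toDigits (n : Nat) : List.foldl nlcStep 0 (Nat.toDigits 10 n) = n := by
  rw [Nat.toDigits, nlc_core_fold (n + 1) n [] (by omega)]; rfl

lemma nlc_toStr_inj (a b : Int) (ha : 0 ≤ a) (hb : 0 ≤ b)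
    (h : PySem.Int.toStr a = PySem.Int.toStr b) : a = b := by
  have h' : PySem.Int.toChars a = PySem.Int.toChars b := by
    rw [← PySem.Int.toList_toStr, ← PySem.Int.toList_toStr, h]
  unfold PySem.Int.toChars at h'
  rw [if_neg (by omega), if_neg (by omega)] at h'
  have := congrArg (List.foldl nlcStep 0) h'
  rw [nlc_fold_toDigits, nlc_fold_toDigits] at this
  omega

-- a code is base ++ t exactly when it starts with base and its suffix slice is t
lemma nlc_code_eq_iff (c base t : String) :
    (PySem.Str.startswith c base = true ∧
      PySem.Str.slice c (some (PySem.Str.len base)) none = t) ↔ c = base ++ t := by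
  rw [← String.toList_inj (s₁ := c)]
  rw [PySem.Str.startswith_eq, PySem.Chars.startswith_iff]
  rw [← String.toList_inj (s₁ := PySem.Str.slice c (some (PySem.Str.len base)) none)]
  rw [PySem.Str.toList_slice, PySem.Chars.slice_eq_listSlice, PySem.Str.len_eq,
      PySem.List.slice_from _ (by positivity)]
  simp only [String.toList_append, Int.toNat_natCast]
  constructor
  · rintro ⟨⟨u, hu⟩, hdrop⟩
    rw [← hdrop, ← hu]; simp
  · intro h
    rw [h]
    exact ⟨⟨t.toList, rfl⟩, by simp⟩

lemma nlc_append_inj (base s t : String) (h : base ++ s = base ++ t) : s = t := by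
  have := congrArg String.toList h
  simp only [String.toList_append] at this
  exact String.toList_inj.mp (List.append_cancel_left this)

-- the candidate-index dict: lookup succeeds exactly on the canonical suffixes "1".."m"
lemma nlc_index_get (m : Int) (s : String) (k : Int) :
    (nlcIndex m).get? s = some k ↔ 1 ≤ k ∧ k < m + 1 ∧ s = PySem.Int.toStr k := by
  have hnodup : ((PySem.List.pyRange 1 (m + 1)).map PySem.Int.toStr).Nodup := by
    refine List.Nodup.map_on ?_ (PySem.List.nodup_pyRange_one 1 (m + 1))
    intro x hx y hy hxy
    rw [PySem.List.mem_pyRange_one] at hx hy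
    exact nlc_toStr_inj x y (by omega) (by omega) hxy
  have hitems : (nlcIndex m).items =
      (PySem.List.pyRange 1 (m + 1)).map (fun a => (PySem.Int.toStr a, a)) := by
    unfold nlcIndex
    rw [PySem.Dict.items_foldl_insert_fresh _ _ _ _ (fun a _ => PySem.Dict.contains_empty _) hnodup]
    rfl
  have hkeys : (nlcIndex m).keys.Nodup := by
    unfold nlcIndex
    exact PySem.Dict.nodup_keys_foldl_insert_key _ _ _ _ (by simp [PySem.Dict.keys_empty])
  rw [PySem.Dict.get?_eq_some_iff_mem_items _ _ _ hkeys, hitems, List.mem_map]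
  constructor
  · rintro ⟨a, ha, heq⟩
    rw [PySem.List.mem_pyRange_one] at ha
    have h2 : a = k := congrArg Prod.snd heq
    have h1 : PySem.Int.toStr a = s := congrArg Prod.fst heq
    subst h2
    exact ⟨by omega, by omega, h1.symm⟩
  · rintro ⟨h1, h2, rfl⟩
    exact ⟨k, PySem.List.mem_pyRange_one.mpr ⟨h1, h2⟩, rfl⟩

-- setting one mark, read back anywhere
lemma nlc_get_set (p : List Bool) (j i : Int) (hj : 0 ≤ j) (hjlen : j.toNat < p.length)
    (hi : 0 ≤ i) :
    nlcGet (p.set j.toNat true) i = if i = j then true else nlcGet p i := by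
  unfold nlcGet
  rw [PySem.List.pyGet?_of_nonneg _ hi, PySem.List.pyGet?_of_nonneg _ hi,
      List.getElem?_set]
  by_cases h : i = j
  · subst h
    simp [show i.toNat < p.length from by omega]
  · have hne : ¬ (j.toNat = i.toNat) := by omega
    simp [hne, h]

-- the mark table after the marking pass: exactly the occurring candidates are marked
lemma nlc_mark_get (base : String) (m : Int) (hm : 1 ≤ m) :
    ∀ (codes : List String) (p : List Bool), p.length = m.toNat + 1 → ∀ i : Int, 0 ≤ i →
      (nlcGet (nlcMark base (nlcIndex m) codes p) i = true ↔
        nlcGet p i = true ∨ (1 ≤ i ∧ i < m + 1 ∧ (base ++ PySem.Int.toStr i) ∈ codes)) := by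
  intro codes
  induction codes with
  | nil => intro p hp i hi; simp [nlcMark]
  | cons code rest ih =>
    intro p hp i hi
    unfold nlcMark
    rw [List.foldl_cons]
    by_cases hsw : PySem.Str.startswith code base
    · rw [if_pos hsw]
      cases hget : (nlcIndex m).get? (PySem.Str.slice code (some (PySem.Str.len base)) none) with
      | some k =>
        rw [nlc_index_get] at hget
        obtain ⟨hk1, hk2, hks⟩ := hget
        have hcode : code = base ++ PySem.Int.toStr k := (nlc_code_eq_iff code base _).mp ⟨hsw, hks⟩
        have := ih (p.set k.toNat true) (by simp [List.length_set, hp]) i hi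
        rw [nlcMark] at this
        rw [this, nlc_get_set p k i (by omega) (by omega) hi]
        constructor
        · rintro (h | h)
          · split_ifs at h with he
            · subst he
              exact Or.inr ⟨hk1, hk2, by rw [hcode]; exact List.mem_cons_self⟩
            · exact Or.inl h
          · exact Or.inr ⟨h.1, h.2.1, List.mem_cons_of_mem _ h.2.2⟩
        · rintro (h | ⟨h1, h2, h3⟩)
          · left; split_ifs with he
            · rfl
            · exact h
          · rcases List.mem_cons.mp h3 with hc | hr
            · left
              have : i = k := by
                apply nlc_toStr_inj i k (by omega) (by omega)
                exact nlc_append_inj base _ _ (hc.trans hcode)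
              rw [if_pos this]
            · right; exact ⟨h1, h2, hr⟩
      | none =>
        have := ih p hp i hi
        rw [nlcMark] at this
        rw [this]
        constructor
        · rintro (h | h)
          · exact Or.inl h
          · exact Or.inr ⟨h.1, h.2.1, List.mem_cons_of_mem _ h.2.2⟩
        · rintro (h | ⟨h1, h2, h3⟩)
          · exact Or.inl h
          · rcases List.mem_cons.mp h3 with hc | hr
            · exfalso
              have hcs : PySem.Str.slice code (some (PySem.Str.len base)) none = PySem.Int.toStr i :=
                ((nlc_code_eq_iff code base (PySem.Int.toStr i)).mpr hc.symm).2
              rw [hcs] at hget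
              exact absurd ((nlc_index_get m (PySem.Int.toStr i) i).mpr ⟨h1, h2, rfl⟩)
                (by rw [hget]; simp)
            · exact Or.inr ⟨h1, h2, hr⟩
    · rw [if_neg hsw]
      have := ih p hp i hi
      rw [nlcMark] at this
      rw [this]
      constructor
      · rintro (h | h)
        · exact Or.inl h
        · exact Or.inr ⟨h.1, h.2.1, List.mem_cons_of_mem _ h.2.2⟩
      · rintro (h | ⟨h1, h2, h3⟩)
        · exact Or.inl h
        · rcases List.mem_cons.mp h3 with hc | hr
          · exfalso
            exact hsw ((nlc_code_eq_iff code base (PySem.Int.toStr i)).mpr hc.symm).1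
          · exact Or.inr ⟨h1, h2, hr⟩

-- the scan returns the first unmarked index at or after k
lemma nlc_scan_spec (p : List Bool) :
    ∀ (f : Nat) (k : Int), (∃ j : Nat, j < f ∧ nlcGet p (k + j) = false) →
      ∃ r : Int, nlcScan p f k = r ∧ k ≤ r ∧ nlcGet p r = false ∧
        ∀ t : Int, k ≤ t → t < r → nlcGet p t = true := by
  intro f
  induction f with
  | zero => rintro k ⟨j, hj, _⟩; omega
  | succ f ih =>
    rintro k ⟨j, hj, hjf⟩
    rw [nlcScan]
    by_cases hk : nlcGet p k = true
    · rw [if_pos (by unfold nlcGet at hk; exact hk)]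
      have hj0 : j ≠ 0 := by
        intro h; subst h
        simp only [Nat.cast_zero, add_zero] at hjf
        rw [hk] at hjf
        exact absurd hjf (by decide)
      obtain ⟨r, hr1, hr2, hr3, hr4⟩ := ih (k + 1) ⟨j - 1, by omega,
        by rw [show k + 1 + ((j - 1 : Nat) : Int) = k + j by omega]; exact hjf⟩
      exact ⟨r, hr1, by omega, hr3, fun t ht1 ht2 => by
        rcases eq_or_lt_of_le ht1 with h | h
        · rw [← h]; exact hk
        · exact hr4 t (by omega) ht2⟩
    · rw [if_neg (by unfold nlcGet at hk; simpa using hk)]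
      exact ⟨k, rfl, le_refl k, by simpa using hk, fun t ht1 ht2 => by omega⟩

-- A's loop returns the first free code at or after idx
lemma nlc_aloop_spec (codes : List String) (base : String) :
    ∀ (f : Nat) (idx : Int), (∃ j : Nat, j ≤ f ∧ (base ++ PySem.Int.toStr (idx + j)) ∉ codes) →
      ∃ r : Int, nlcALoop codes base f idx = base ++ PySem.Int.toStr r ∧ idx ≤ r ∧
        (base ++ PySem.Int.toStr r) ∉ codes ∧
        ∀ t : Int, idx ≤ t → t < r → (base ++ PySem.Int.toStr t) ∈ codes := by
  intro f
  induction f with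
  | zero =>
    rintro idx ⟨j, hj, hjf⟩
    interval_cases j
    refine ⟨idx, rfl, le_refl idx, by simpa using hjf, fun t ht1 ht2 => by omega⟩
  | succ f ih =>
    rintro idx ⟨j, hj, hjf⟩
    rw [nlcALoop]
    by_cases hmem : (base ++ PySem.Int.toStr idx) ∈ codes
    · simp only [hmem, if_pos]
      have hj0 : j ≠ 0 := by
        intro h; subst h
        rw [show idx + ((0:Nat) : Int) = idx from by push_cast; ring] at hjf
        exact hjf hmem
      obtain ⟨r, hr1, hr2, hr3, hr4⟩ := ih (idx + 1) ⟨j - 1, by omega,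
        by rw [show idx + 1 + ((j - 1 : Nat) : Int) = idx + j by omega]; exact hjf⟩
      exact ⟨r, hr1, by omega, hr3, fun t ht1 ht2 => by
        rcases eq_or_lt_of_le ht1 with h | h
        · rw [← h]; exact hmem
        · exact hr4 t (by omega) ht2⟩
    · simp only [hmem, if_false]
      exact ⟨idx, by simp, le_refl idx, hmem, fun t ht1 ht2 => by omega⟩

-- pigeonhole: among the len+1 pairwise distinct candidates one is free
lemma nlc_exists_free (codes : List String) (base : String) :
    ∃ k : Int, 1 ≤ k ∧ k ≤ (codes.length : Int) + 1 ∧ (base ++ PySem.Int.toStr k) ∉ codes := by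
  by_contra hall
  push Not at hall
  set l : List String := (List.range (codes.length + 1)).map
    (fun j : Nat => base ++ PySem.Int.toStr ((j : Int) + 1)) with hl
  have hnodup : l.Nodup := by
    refine List.Nodup.map_on ?_ (List.nodup_range)
    intro x hx y hy hxy
    have := nlc_toStr_inj ((x : Int) + 1) ((y : Int) + 1) (by omega) (by omega)
      (nlc_append_inj base _ _ hxy)
    omega
  have hsub : l ⊆ codes := by
    intro c hc
    rw [hl, List.mem_map] at hc
    obtain ⟨j, hj, rfl⟩ := hc
    rw [List.mem_range] at hj
    exact hall ((j : Int) + 1) (by omega) (by omega)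
  have hcard : l.length ≤ codes.length := by
    have h1 : l.toFinset.card = l.length := List.toFinset_card_of_nodup hnodup
    have h2 : l.toFinset ⊆ codes.toFinset := by
      intro x hx
      rw [List.mem_toFinset] at hx ⊢
      exact hsub hx
    have h3 := Finset.card_le_card h2
    have h4 := codes.toFinset_card_le
    omega
  simp [hl] at hcard

-- ===== VERDICT (by name: the statement is the Claim_ definition above) =====
theorem next_lineage_code_py_spec : Claim_equal_next_lineage_code_py := by
  intro parent_code codes _
  unfold Spec_next_lineage_code_py
  show nlcALoop codes (parent_code ++ "a") (codes.length + 1) 1 =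
    (parent_code ++ "a") ++ PySem.Int.toStr (nlcScan
      (nlcMark (parent_code ++ "a") (nlcIndex ((codes.length : Int) + 1)) codes
        (PySem.List.pyRepeat [false] (((codes.length : Int) + 1) + 1)))
      (codes.length + 1) 1)
  set base := parent_code ++ "a" with hbase
  set m : Int := (codes.length : Int) + 1 with hmdef
  obtain ⟨k0, hk1, hk2, hk3⟩ := nlc_exists_free codes base
  obtain ⟨rA, hA1, hA2, hA3, hA4⟩ := nlc_aloop_spec codes base (codes.length + 1) 1
    ⟨(k0 - 1).toNat, by omega,
      by rw [show (1 : Int) + ((k0 - 1).toNat : Int) = k0 by omega]; exact hk3⟩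
  have hrep : PySem.List.pyRepeat [false] (m + 1) = List.replicate (m + 1).toNat false :=
    PySem.List.pyRepeat_singleton false (m + 1)
  have hp0len : (PySem.List.pyRepeat [false] (m + 1)).length = m.toNat + 1 := by
    rw [hrep, List.length_replicate]; omega
  have hp0get : ∀ i : Int, 0 ≤ i → nlcGet (PySem.List.pyRepeat [false] (m + 1)) i = false := by
    intro i hi
    unfold nlcGet
    rw [PySem.List.pyGet?_of_nonneg _ hi, hrep, List.getElem?_replicate]
    split_ifs <;> rfl
  set present := nlcMark base (nlcIndex m) codes (PySem.List.pyRepeat [false] (m + 1)) with hpres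
  have hpget : ∀ i : Int, 0 ≤ i →
      (nlcGet present i = true ↔ (1 ≤ i ∧ i < m + 1 ∧ (base ++ PySem.Int.toStr i) ∈ codes)) := by
    intro i hi
    rw [hpres, nlc_mark_get base m (by omega) codes _ hp0len i hi, hp0get i hi]
    simp
  have hk0get : nlcGet present k0 = false := by
    cases h : nlcGet present k0 with
    | false => rfl
    | true => exact absurd ((hpget k0 (by omega)).mp h).2.2 hk3
  obtain ⟨rB, hB1, hB2, hB3, hB4⟩ := nlc_scan_spec present (codes.length + 1) 1
    ⟨(k0 - 1).toNat, by omega,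
      by rw [show (1 : Int) + ((k0 - 1).toNat : Int) = k0 by omega]; exact hk0get⟩
  have hrBk0 : rB ≤ k0 := by
    by_contra h
    rw [hB4 k0 (by omega) (by omega)] at hk0get
    exact absurd hk0get (by decide)
  have hrBfree : (base ++ PySem.Int.toStr rB) ∉ codes := by
    intro hmem
    have : nlcGet present rB = true := (hpget rB (by omega)).mpr ⟨by omega, by omega, hmem⟩
    rw [hB3] at this
    exact absurd this (by decide)
  have hreq : rA = rB := by
    rcases lt_trichotomy rA rB with h | h | h
    · exact absurd ((hpget rA (by omega)).mp (hB4 rA (by omega) h)).2.2 hA3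
    · exact h
    · exact absurd (hA4 rB (by omega) h) hrBfree
  rw [hA1, hB1, hreq]
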